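-- pv_equiv track=rewrite | github.com/Soulfra/soulfra | analyze_system.py | categorize_routes
-- ===== SOURCE A (Python) =====
-- def categorize_routes(routes):
--     """Group routes by category"""
--     categories = {
--         'API': [],
--         'QR System': [],
--         'Dashboard/Admin': [],
--         'User Pages': [],
--         'Voice/AI': [],
--         'Domains': [],
--         'Other': []
--     }
--
--     for path, methods in routes.items():
--         if path.startswith('/api'):
--             categories['API'].append((path, methods))
--         elif '/qr' in path:
--             categories['QR System'].append((path, methods))
--         elif '/dashboard' in path or '/debug' in path:
--             categories['Dashboard/Admin'].append((path, methods))
--         elif '/me' in path or path == '/':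
--             categories['User Pages'].append((path, methods))
--         elif 'voice' in path or 'ai' in path or 'narrative' in path:
--             categories['Voice/AI'].append((path, methods))
--         elif '/domains' in path or '/<domain_slug>' in path:
--             categories['Domains'].append((path, methods))
--         else:
--             categories['Other'].append((path, methods))
--
--     return categories
-- ===== SOURCE B (Python) =====
-- def categorize_routes(routes):
--     """Group routes by category"""
--     def classify(path):
--         if path.startswith('/api'):
--             return 'API'
--         if '/qr' in path:
--             return 'QR System'
--         if '/dashboard' in path or '/debug' in path:
--             return 'Dashboard/Admin'
--         if '/me' in path or path == '/':
--             return 'User Pages'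
--         if 'voice' in path or 'ai' in path or 'narrative' in path:
--             return 'Voice/AI'
--         if '/domains' in path or '/<domain_slug>' in path:
--             return 'Domains'
--         return 'Other'
--
--     names = ['API', 'QR System', 'Dashboard/Admin', 'User Pages',
--              'Voice/AI', 'Domains', 'Other']
--     return {name: [(p, m) for p, m in routes.items() if classify(p) == name]
--             for name in names}
-- ===== Notes on version B (the rewrite author's own statement) =====
-- stated objective: idiomatic
-- what changed: B replaces A's single mutating loop that appends into pre-built buckets by a pure classify(path) function plus a dict comprehension that builds each category's bucket as a filter of the routes.
import Mathlib
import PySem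

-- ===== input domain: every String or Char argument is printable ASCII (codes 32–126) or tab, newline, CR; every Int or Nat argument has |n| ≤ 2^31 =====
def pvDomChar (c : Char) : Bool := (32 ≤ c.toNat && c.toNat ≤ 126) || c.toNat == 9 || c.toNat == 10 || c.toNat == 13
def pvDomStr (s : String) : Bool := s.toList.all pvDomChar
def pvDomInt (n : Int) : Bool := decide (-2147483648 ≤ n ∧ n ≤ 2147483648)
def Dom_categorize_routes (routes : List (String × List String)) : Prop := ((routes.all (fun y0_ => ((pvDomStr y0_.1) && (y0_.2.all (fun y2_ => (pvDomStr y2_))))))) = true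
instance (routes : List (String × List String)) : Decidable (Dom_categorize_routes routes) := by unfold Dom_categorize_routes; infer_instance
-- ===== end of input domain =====

-- B replaces A's mutating bucket-append loop by a pure classifier plus one filter per category (objective: idiomatic; same cost).


-- ===== PORT A =====
-- loop body of A: the elif chain appending (path, methods) to its bucket
def catA_step (d : PySem.Dict String (List (String × List String)))
    (pm : String × List String) : PySem.Dict String (List (String × List String)) :=
  if PySem.Str.startswith pm.1 "/api" then d.modify "API" [] (· ++ [pm])
  else if PySem.Str.isIn "/qr" pm.1 then d.modify "QR System" [] (· ++ [pm])
  else if PySem.Str.isIn "/dashboard" pm.1 || PySem.Str.isIn "/debug" pm.1 then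
    d.modify "Dashboard/Admin" [] (· ++ [pm])
  else if PySem.Str.isIn "/me" pm.1 || pm.1 == "/" then d.modify "User Pages" [] (· ++ [pm])
  else if PySem.Str.isIn "voice" pm.1 || PySem.Str.isIn "ai" pm.1 || PySem.Str.isIn "narrative" pm.1 then
    d.modify "Voice/AI" [] (· ++ [pm])
  else if PySem.Str.isIn "/domains" pm.1 || PySem.Str.isIn "/<domain_slug>" pm.1 then
    d.modify "Domains" [] (· ++ [pm])
  else d.modify "Other" [] (· ++ [pm])

def categorize_routes (routes : List (String × List String)) : List (String × List (String × List String)) :=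
  (routes.foldl catA_step (PySem.Dict.ofList
    [("API", []), ("QR System", []), ("Dashboard/Admin", []), ("User Pages", []),
     ("Voice/AI", []), ("Domains", []), ("Other", [])])).items

-- ===== PORT B =====
-- B: a pure classifier plus one filter per category (mirrors Source B's comprehension)
def catB_classify (path : String) : String :=
  if PySem.Str.startswith path "/api" then "API"
  else if PySem.Str.isIn "/qr" path then "QR System"
  else if PySem.Str.isIn "/dashboard" path || PySem.Str.isIn "/debug" path then "Dashboard/Admin"
  else if PySem.Str.isIn "/me" path || path == "/" then "User Pages"
  else if PySem.Str.isIn "voice" path || PySem.Str.isIn "ai" path || PySem.Str.isIn "narrative" path then "Voice/AI"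
  else if PySem.Str.isIn "/domains" path || PySem.Str.isIn "/<domain_slug>" path then "Domains"
  else "Other"

def catB_names : List String :=
  ["API", "QR System", "Dashboard/Admin", "User Pages", "Voice/AI", "Domains", "Other"]

def categorize_routes_alt (routes : List (String × List String)) : List (String × List (String × List String)) :=
  catB_names.map (fun name => (name, routes.filter (fun pm => catB_classify pm.1 == name)))

-- ===== PRECONDITION & SPEC =====
def Spec_categorize_routes (routes : List (String × List String)) (out : List (String × List (String × List String))) : Prop := out = categorize_routes_alt routes
instance (routes : List (String × List String)) (out : List (String × List (String × List String))) : Decidable (Spec_categorize_routes routes out) := by unfold Spec_categorize_routes; infer_instance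

-- ===== CLAIM (what is proved, stated in full; the proofs are below) =====
def Claim_equal_categorize_routes : Prop := ∀ (routes : List (String × List String)), Dom_categorize_routes routes → Spec_categorize_routes routes (categorize_routes routes)

-- ===== LEMMAS AND PROOFS =====

def catF (c : String) (l : List (String × List String)) : List (String × List String) :=
  l.filter (fun pm => catB_classify pm.1 == c)

lemma catF_cons (c : String) (x : String × List String) (l : List (String × List String)) :
    catF c (x :: l) = if catB_classify x.1 == c then x :: catF c l else catF c l := by
  simp [catF, List.filter_cons]

lemma catM0 (a b c d e f g : List (String × List String)) (x : String × List String) :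
    (PySem.Dict.mk [("API", a), ("QR System", b), ("Dashboard/Admin", c), ("User Pages", d), ("Voice/AI", e), ("Domains", f), ("Other", g)]).modify "API" [] (· ++ [x])
    = PySem.Dict.mk [("API", (a ++ [x])), ("QR System", b), ("Dashboard/Admin", c), ("User Pages", d), ("Voice/AI", e), ("Domains", f), ("Other", g)] := rfl

lemma catM1 (a b c d e f g : List (String × List String)) (x : String × List String) :
    (PySem.Dict.mk [("API", a), ("QR System", b), ("Dashboard/Admin", c), ("User Pages", d), ("Voice/AI", e), ("Domains", f), ("Other", g)]).modify "QR System" [] (· ++ [x])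
    = PySem.Dict.mk [("API", a), ("QR System", (b ++ [x])), ("Dashboard/Admin", c), ("User Pages", d), ("Voice/AI", e), ("Domains", f), ("Other", g)] := rfl

lemma catM2 (a b c d e f g : List (String × List String)) (x : String × List String) :
    (PySem.Dict.mk [("API", a), ("QR System", b), ("Dashboard/Admin", c), ("User Pages", d), ("Voice/AI", e), ("Domains", f), ("Other", g)]).modify "Dashboard/Admin" [] (· ++ [x])
    = PySem.Dict.mk [("API", a), ("QR System", b), ("Dashboard/Admin", (c ++ [x])), ("User Pages", d), ("Voice/AI", e), ("Domains", f), ("Other", g)] := rfl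

lemma catM3 (a b c d e f g : List (String × List String)) (x : String × List String) :
    (PySem.Dict.mk [("API", a), ("QR System", b), ("Dashboard/Admin", c), ("User Pages", d), ("Voice/AI", e), ("Domains", f), ("Other", g)]).modify "User Pages" [] (· ++ [x])
    = PySem.Dict.mk [("API", a), ("QR System", b), ("Dashboard/Admin", c), ("User Pages", (d ++ [x])), ("Voice/AI", e), ("Domains", f), ("Other", g)] := rfl

lemma catM4 (a b c d e f g : List (String × List String)) (x : String × List String) :
    (PySem.Dict.mk [("API", a), ("QR System", b), ("Dashboard/Admin", c), ("User Pages", d), ("Voice/AI", e), ("Domains", f), ("Other", g)]).modify "Voice/AI" [] (· ++ [x])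
    = PySem.Dict.mk [("API", a), ("QR System", b), ("Dashboard/Admin", c), ("User Pages", d), ("Voice/AI", (e ++ [x])), ("Domains", f), ("Other", g)] := rfl

lemma catM5 (a b c d e f g : List (String × List String)) (x : String × List String) :
    (PySem.Dict.mk [("API", a), ("QR System", b), ("Dashboard/Admin", c), ("User Pages", d), ("Voice/AI", e), ("Domains", f), ("Other", g)]).modify "Domains" [] (· ++ [x])
    = PySem.Dict.mk [("API", a), ("QR System", b), ("Dashboard/Admin", c), ("User Pages", d), ("Voice/AI", e), ("Domains", (f ++ [x])), ("Other", g)] := rfl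

lemma catM6 (a b c d e f g : List (String × List String)) (x : String × List String) :
    (PySem.Dict.mk [("API", a), ("QR System", b), ("Dashboard/Admin", c), ("User Pages", d), ("Voice/AI", e), ("Domains", f), ("Other", g)]).modify "Other" [] (· ++ [x])
    = PySem.Dict.mk [("API", a), ("QR System", b), ("Dashboard/Admin", c), ("User Pages", d), ("Voice/AI", e), ("Domains", f), ("Other", (g ++ [x]))] := rfl

lemma cat_main (l : List (String × List String))
    (a b c d e f g : List (String × List String)) :
    (l.foldl catA_step (PySem.Dict.mk
      [("API", a), ("QR System", b), ("Dashboard/Admin", c), ("User Pages", d),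
       ("Voice/AI", e), ("Domains", f), ("Other", g)])).items
    = [("API", a ++ catF "API" l), ("QR System", b ++ catF "QR System" l),
       ("Dashboard/Admin", c ++ catF "Dashboard/Admin" l), ("User Pages", d ++ catF "User Pages" l),
       ("Voice/AI", e ++ catF "Voice/AI" l), ("Domains", f ++ catF "Domains" l),
       ("Other", g ++ catF "Other" l)] := by
  induction l generalizing a b c d e f g with
  | nil => simp [catF]
  | cons x l ih =>
    simp only [List.foldl_cons, catA_step]
    split_ifs with h1 h2 h3 h4 h5 h6
    · have hc : catB_classify x.1 = "API" := by simp only [catB_classify, *, if_true, if_false, Bool.false_eq_true]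
      rw [catM0, ih]
      simp [catF_cons, hc]
    · have hc : catB_classify x.1 = "QR System" := by simp only [catB_classify, *, if_true, if_false, Bool.false_eq_true]
      rw [catM1, ih]
      simp [catF_cons, hc]
    · have hc : catB_classify x.1 = "Dashboard/Admin" := by simp only [catB_classify, *, if_true, if_false, Bool.false_eq_true]
      rw [catM2, ih]
      simp [catF_cons, hc]
    · have hc : catB_classify x.1 = "User Pages" := by simp only [catB_classify, *, if_true, if_false, Bool.false_eq_true]
      rw [catM3, ih]
      simp [catF_cons, hc]
    · have hc : catB_classify x.1 = "Voice/AI" := by simp only [catB_classify, *, if_true, if_false, Bool.false_eq_true]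
      rw [catM4, ih]
      simp [catF_cons, hc]
    · have hc : catB_classify x.1 = "Domains" := by simp only [catB_classify, *, if_true, if_false, Bool.false_eq_true]
      rw [catM5, ih]
      simp [catF_cons, hc]
    · have hc : catB_classify x.1 = "Other" := by simp only [catB_classify, *, if_true, if_false, Bool.false_eq_true]
      rw [catM6, ih]
      simp [catF_cons, hc]

-- ===== VERDICT (by name: the statement is the Claim_ definition above) =====
theorem categorize_routes_spec : Claim_equal_categorize_routes := by
  intro routes _
  show categorize_routes routes = categorize_routes_alt routes
  unfold categorize_routes categorize_routes_alt
  rw [show (PySem.Dict.ofList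
      [("API", ([] : List (String × List String))), ("QR System", []), ("Dashboard/Admin", []),
       ("User Pages", []), ("Voice/AI", []), ("Domains", []), ("Other", [])]) = PySem.Dict.mk
      [("API", []), ("QR System", []), ("Dashboard/Admin", []), ("User Pages", []),
       ("Voice/AI", []), ("Domains", []), ("Other", [])] from rfl]
  rw [cat_main]
  simp [catB_names, catF]
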